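-- pv_equiv track=rewrite | github.com/RussellDash332/kattis | src/Treequivalence/treequivalence.py | parse
-- ===== SOURCE A (Python) =====
-- def parse(s):
--     L = [i for i in s if 'A'<=i<='Z']; N = len(L); T = [[] for _ in L]; S = []; B = 0; V = [1]*N; R = [N-1]*N; U = [0]; W = [(0, -1)]; A = []
--     for i in s[1:]:
--         if i == '(': S.append(B)
--         elif i == ')': S.pop()
--         if 'A'<=i<='Z': B += 1; T[S[-1]].append(B)
--     while U:
--         u, b = divmod(U.pop(), 2)
--         if b:
--             for v in T[u]: V[u] += V[v]
--         else:
--             U.append(2*u+1)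
--             for v in T[u]: U.append(2*v)
--     while W:
--         ub, p = W.pop(); u, b = divmod(ub, 2)
--         if b:
--             if u: A.append((L[u], R[u]))
--         else:
--             if p != -1: A.append((L[p], V[u])); R[p] -= V[u]
--             if not T[u]: A.append((L[u], R[u])); continue
--             W.append((2*u+1, -1))
--             for v in T[u][::-1]: W.append((2*v, u))
--     return ''.join(i+chr(j) for i, j in A)
-- ===== SOURCE B (Python) =====
-- def parse(s):
--     L = [c for c in s if 'A' <= c <= 'Z']
--     n = len(L)
--     kids = [[] for _ in L]
--     stack = []
--     b = 0
--     for c in s[1:]: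
--         if c == '(':
--             stack.append(b)
--         elif c == ')':
--             stack.pop()
--         if 'A' <= c <= 'Z':
--             b += 1
--             kids[stack[-1]].append(b)
--     sz = [1] * n
--     def fill(u):
--         t = 1
--         for v in kids[u]:
--             t += fill(v)
--         sz[u] = t
--         return t
--     fill(0)
--     rest = [n - 1] * n
--     out = []
--     def dfs(u, p):
--         if p != -1:
--             out.append(L[p] + chr(sz[u]))
--             rest[p] -= sz[u]
--         if not kids[u]:
--             out.append(L[u] + chr(rest[u]))
--             return
--         for v in kids[u]:
--             dfs(v, u)
--         if u:
--             out.append(L[u] + chr(rest[u]))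
--     dfs(0, -1)
--     return ''.join(out)
-- ===== Notes on version B (the rewrite author's own statement) =====
-- stated objective: simpler
-- what changed: A's two hand-rolled stack machines over 2u/2u+1-encoded tasks are replaced by two plain recursive tree walks (a size recursion and a DFS emitter) over the same child lists; the encoding/divmod bookkeeping disappears.
import Mathlib
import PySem

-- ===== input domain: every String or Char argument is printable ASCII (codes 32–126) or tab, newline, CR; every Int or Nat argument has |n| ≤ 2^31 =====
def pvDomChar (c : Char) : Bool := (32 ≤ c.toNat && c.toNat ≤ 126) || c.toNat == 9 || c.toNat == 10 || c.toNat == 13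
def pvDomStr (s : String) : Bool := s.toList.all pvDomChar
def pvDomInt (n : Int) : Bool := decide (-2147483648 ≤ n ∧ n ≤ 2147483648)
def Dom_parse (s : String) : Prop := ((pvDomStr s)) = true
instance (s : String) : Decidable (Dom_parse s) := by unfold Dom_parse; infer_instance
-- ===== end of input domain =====

-- B replaces A's two explicit stack machines (2u/2u+1-encoded tasks) by two plain recursive
-- tree walks (a size recursion and a DFS emitter) over the same child lists: simpler, same cost.

-- ===== PORT A =====

def pvIsUp (c : Char) : Bool := decide ('A' ≤ c) && decide (c ≤ 'Z')

-- the scan 'for i in s[1:]' building the child lists T (stack S kept head-first: append = cons)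
def parseScan : List Char → List (List Nat) → List Nat → Nat → List (List Nat)
  | [], T, _, _ => T
  | c :: cs, T, S, B =>
    let S' := if c = '(' then B :: S else if c = ')' then S.tail else S
    if pvIsUp c then
      parseScan cs (T.set (S'.headD 0) ((T.getD (S'.headD 0) []).concat (B+1))) S' (B+1)
    else parseScan cs T S' B

-- 'while U:' stack machine filling V; stack head-first; fuel only makes the loop total
def parseLoop1 (T : List (List Nat)) : Nat → List Nat → List Nat → List Nat
  | 0, _, V => V
  | _+1, [], V => V
  | f+1, x :: U, V =>
    if x % 2 = 1 then
      parseLoop1 T f U (V.set (x/2) ((T.getD (x/2) []).foldl (fun a v => a + V.getD v 0) (V.getD (x/2) 0)))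
    else
      parseLoop1 T f (((T.getD (x/2) []).map (fun v => 2*v)).reverse ++ (2*(x/2)+1) :: U) V

-- 'while W:' stack machine emitting the (char, code) pairs; fuel only makes the loop total
def parseLoop2 (T : List (List Nat)) (Lc : List Char) (V : List Nat) :
    Nat → List (Nat × Int) → List Nat → List (Char × Nat) → List (Char × Nat)
  | 0, _, _, acc => acc
  | _+1, [], _, acc => acc
  | f+1, (x, p) :: W, R, acc =>
    if x % 2 = 1 then
      parseLoop2 T Lc V f W R (if x/2 ≠ 0 then acc.concat (Lc.getD (x/2) 'A', R.getD (x/2) 0) else acc)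
    else
      let acc1 := if p ≠ -1 then acc.concat (Lc.getD p.toNat 'A', V.getD (x/2) 0) else acc
      let R1 := if p ≠ -1 then R.set p.toNat (R.getD p.toNat 0 - V.getD (x/2) 0) else R
      if (T.getD (x/2) []).isEmpty then
        parseLoop2 T Lc V f W R1 (acc1.concat (Lc.getD (x/2) 'A', R1.getD (x/2) 0))
      else
        parseLoop2 T Lc V f (((T.getD (x/2) []).map (fun v => (2*v, (x/2 : Int)))) ++ (2*(x/2)+1, (-1 : Int)) :: W) R1 acc1

def parse (s : String) : String :=
  let cs := s.toList
  let Lc := cs.filter pvIsUp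
  let N := Lc.length
  let T := parseScan cs.tail (List.replicate N []) [] 0
  let fuel := 2*(N+1)^(N+1)+2
  let V := parseLoop1 T fuel [0] (List.replicate N 1)
  let acc := parseLoop2 T Lc V fuel [(0, -1)] (List.replicate N (N-1)) []
  String.ofList (acc.flatMap fun pr => [pr.1, Char.ofNat pr.2])

-- ===== PORT B =====

-- same parsing pass, as a fold with a (kids, stack, counter) state
def parseAltStep (st : List (List Nat) × List Nat × Nat) (c : Char) :
    List (List Nat) × List Nat × Nat :=
  let stk := if c = '(' then st.2.2 :: st.2.1 else if c = ')' then st.2.1.tail else st.2.1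
  if pvIsUp c then
    (st.1.set (stk.headD 0) ((st.1.getD (stk.headD 0) []).concat (st.2.2+1)), stk, st.2.2+1)
  else (st.1, stk, st.2.2)

-- 'def fill(u)': returns (subtree size, updated sz array); fuel bounds the recursion depth
def parseAltFill (kids : List (List Nat)) : Nat → Nat → List Nat → Nat × List Nat
  | 0, _, sz => (1, sz)
  | f+1, u, sz =>
    let q := (kids.getD u []).foldl (fun pr v =>
      let r := parseAltFill kids f v pr.2
      (pr.1 + r.1, r.2)) (1, sz)
    (q.1, q.2.set u q.1)

-- 'def dfs(u, p)': threads the (rest, out) pair; fuel bounds the recursion depth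
def parseAltDfs (kids : List (List Nat)) (Lc : List Char) (sz : List Nat) :
    Nat → Nat → Int → List Nat × List (Char × Nat) → List Nat × List (Char × Nat)
  | 0, _, _, st => st
  | f+1, u, p, st =>
    let out1 := if p ≠ -1 then st.2.concat (Lc.getD p.toNat 'A', sz.getD u 0) else st.2
    let rest1 := if p ≠ -1 then st.1.set p.toNat (st.1.getD p.toNat 0 - sz.getD u 0) else st.1
    if (kids.getD u []).isEmpty then (rest1, out1.concat (Lc.getD u 'A', rest1.getD u 0))
    else
      let st2 := (kids.getD u []).foldl (fun st' v => parseAltDfs kids Lc sz f v u st') (rest1, out1)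
      if u ≠ 0 then (st2.1, st2.2.concat (Lc.getD u 'A', st2.1.getD u 0)) else st2

def parse_alt (s : String) : String :=
  let cs := s.toList
  let Lc := cs.filter pvIsUp
  let n := Lc.length
  let kids := (cs.tail.foldl parseAltStep (List.replicate n [], [], 0)).1
  let sz := (parseAltFill kids (n+1) 0 (List.replicate n 1)).2
  let st := parseAltDfs kids Lc sz (n+1) 0 (-1) (List.replicate n (n-1), [])
  String.ofList (st.2.flatMap fun pr => [pr.1, Char.ofNat pr.2])

-- ===== PRECONDITION & SPEC =====

-- balanced-prefix scan used by Pre_: every ')' and every uppercase letter of s[1:] must sit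
-- at parenthesis depth > 0 (else A's S.pop()/S[-1] raises IndexError)
def pvPreOk : List Char → Nat → Bool
  | [], _ => true
  | c :: cs, d =>
    if c = '(' then pvPreOk cs (d+1)
    else if c = ')' then decide (0 < d) && pvPreOk cs (d-1)
    else if pvIsUp c then decide (0 < d) && pvPreOk cs d
    else pvPreOk cs d

-- Pre_ = exactly the inputs on which the Python A returns: s starts with an uppercase letter
-- (otherwise A's arrays are too short and indexing raises) and the depth condition above holds
def Pre_parse (s : String) : Prop :=
  (match s.toList with
   | [] => false
   | c :: cs => pvIsUp c && pvPreOk cs 0) = true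
instance (s : String) : Decidable (Pre_parse s) := by unfold Pre_parse; infer_instance

def pvWitness_parse : String := "A(B)"

def Spec_parse (s : String) (out : String) : Prop := out = parse_alt s
instance (s : String) (out : String) : Decidable (Spec_parse s out) := by unfold Spec_parse; infer_instance

-- ===== CLAIM (what is proved, stated in full; the proofs are below) =====
def Claim_equal_parse : Prop := ∀ (s : String), Dom_parse s → Pre_parse s → Spec_parse s (parse s)

-- ===== LEMMAS AND PROOFS =====


theorem pvGetD_set {α : Type} (V : List α) (u w : Nat) (x d : α) (hu : u < V.length) :
    (V.set u x).getD w d = if w = u then x else V.getD w d := by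
  by_cases h : w = u
  · subst h; simp [List.getD, hu]
  · simp [List.getD, List.getElem?_set_ne (by omega : u ≠ w), h]

theorem pvGetD_rangeMap (N : Nat) (f : Nat → Nat) (w d : Nat) :
    ((List.range N).map f).getD w d = if w < N then f w else d := by
  by_cases h : w < N
  · simp [List.getD, h]
  · rw [List.getD, List.getElem?_eq_none (by simpa using Nat.le_of_not_lt h)]
    simp [h]

theorem pvFoldl_add_eq_sum (g : Nat → Nat) (l : List Nat) (c : Nat) :
    l.foldl (fun a v => a + g v) c = c + (l.map g).sum := by
  induction l generalizing c with
  | nil => simp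
  | cons x xs ih => simp [List.foldl, ih]; omega

-- ancestor chains of a parent function with P v < v
def pvAncGo (P : Nat → Nat) : Nat → Nat → List Nat
  | f, w => w :: (if w = 0 then [] else match f with | 0 => [] | f+1 => pvAncGo P f (P w))

def pvAnc (P : Nat → Nat) (w : Nat) : List Nat := pvAncGo P w w

theorem pvAncGo_stable (P : Nat → Nat) (hP : ∀ v, 1 ≤ v → P v < v) :
    ∀ k f w, w ≤ f → w ≤ k → pvAncGo P f w = pvAnc P w := by
  intro k
  induction k with
  | zero =>
    intro f w hf hk
    interval_cases w
    cases f <;> simp [pvAncGo, pvAnc]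
  | succ k ih =>
    intro f w hf hk
    by_cases h0 : w = 0
    · subst h0; cases f <;> simp [pvAncGo, pvAnc]
    · have hw : 1 ≤ w := by omega
      have hpw := hP w hw
      cases f with
      | zero => omega
      | succ f =>
        have h1 : pvAncGo P f (P w) = pvAnc P (P w) := ih f (P w) (by omega) (by omega)
        have h2 : ∀ f', P w ≤ f' → pvAncGo P f' (P w) = pvAnc P (P w) := fun f' hf' => ih f' (P w) hf' (by omega)
        cases hww : w with
        | zero => omega
        | succ w' =>
          subst hww
          simp only [pvAncGo, h0, if_false, pvAnc]
          rw [h2 f (by omega), h2 w' (by omega)]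

theorem pvAnc_zero (P : Nat → Nat) : pvAnc P 0 = [0] := by simp [pvAnc, pvAncGo]

theorem pvAnc_succ (P : Nat → Nat) (hP : ∀ v, 1 ≤ v → P v < v) (w : Nat) (hw : 1 ≤ w) :
    pvAnc P w = w :: pvAnc P (P w) := by
  cases hww : w with
  | zero => omega
  | succ w' =>
    subst hww
    have hpw := hP (w'+1) hw
    conv_lhs => rw [pvAnc]
    simp only [pvAncGo, Nat.succ_ne_zero, if_false]
    rw [pvAncGo_stable P hP (P (w'+1)) w' (P (w'+1)) (by omega) (le_refl _)]

theorem pvAnc_self (P : Nat → Nat) (w : Nat) : w ∈ pvAnc P w := by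
  rw [pvAnc]; cases w <;> simp [pvAncGo]

theorem pvMem_anc (P : Nat → Nat) (hP : ∀ v, 1 ≤ v → P v < v) (w : Nat) (hw : 1 ≤ w) (v : Nat) :
    v ∈ pvAnc P w ↔ v = w ∨ v ∈ pvAnc P (P w) := by
  rw [pvAnc_succ P hP w hw]; simp

theorem pvMem_anc_le (P : Nat → Nat) (hP : ∀ v, 1 ≤ v → P v < v) :
    ∀ k w, w ≤ k → ∀ v, v ∈ pvAnc P w → v ≤ w := by
  intro k
  induction k with
  | zero => intro w hw v hv; interval_cases w; rw [pvAnc_zero] at hv; simp at hv; omega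
  | succ k ih =>
    intro w hw v hv
    by_cases h0 : w = 0
    · subst h0; rw [pvAnc_zero] at hv; simp at hv; omega
    · rw [pvMem_anc P hP w (by omega)] at hv
      rcases hv with h | h
      · omega
      · have := ih (P w) (by have := hP w (by omega); omega) v h
        have := hP w (by omega); omega

theorem pvAnc_trans (P : Nat → Nat) (hP : ∀ v, 1 ≤ v → P v < v) :
    ∀ k w, w ≤ k → ∀ u v, u ∈ pvAnc P v → v ∈ pvAnc P w → u ∈ pvAnc P w := by
  intro k
  induction k with
  | zero =>
    intro w hw u v hu hv; interval_cases w
    rw [pvAnc_zero] at hv ⊢; simp at hv; subst hv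
    rw [pvAnc_zero] at hu; simpa using hu
  | succ k ih =>
    intro w hw u v hu hv
    by_cases h0 : w = 0
    · subst h0
      rw [pvAnc_zero] at hv ⊢; simp at hv; subst hv
      rw [pvAnc_zero] at hu; simpa using hu
    · rw [pvMem_anc P hP w (by omega)] at hv ⊢
      rcases hv with h | h
      · exact (pvMem_anc P hP w (by omega) u).mp (h ▸ hu)
      · exact .inr (ih (P w) (by have := hP w (by omega); omega) u v hu h)

theorem pvAnc_decomp (P : Nat → Nat) (hP : ∀ v, 1 ≤ v → P v < v) :
    ∀ k w, w ≤ k → ∀ u, u ∈ pvAnc P w → u ≠ w →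
      ∃ c, 1 ≤ c ∧ c ≤ w ∧ P c = u ∧ c ∈ pvAnc P w := by
  intro k
  induction k with
  | zero => intro w hw u hu hne; interval_cases w; rw [pvAnc_zero] at hu; simp at hu; omega
  | succ k ih =>
    intro w hw u hu hne
    by_cases h0 : w = 0
    · subst h0; rw [pvAnc_zero] at hu; simp at hu; omega
    · rw [pvMem_anc P hP w (by omega)] at hu
      rcases hu with h | h
      · omega
      · by_cases he : u = P w
        · exact ⟨w, by omega, le_refl _, he.symm, pvAnc_self P w⟩
        · obtain ⟨c, hc1, hc2, hc3, hc4⟩ := ih (P w) (by have := hP w (by omega); omega) u h he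
          refine ⟨c, hc1, by have := hP w (by omega); omega, hc3, ?_⟩
          rw [pvMem_anc P hP w (by omega)]; exact .inr hc4

theorem pvAnc_sibling (P : Nat → Nat) (hP : ∀ v, 1 ≤ v → P v < v) :
    ∀ k w, w ≤ k → ∀ c1 c2, c1 ∈ pvAnc P w → c2 ∈ pvAnc P w → 1 ≤ c1 → 1 ≤ c2 →
      P c1 = P c2 → c1 = c2 := by
  intro k
  induction k with
  | zero => intro w hw c1 c2 h1 h2 g1 g2 _; interval_cases w; rw [pvAnc_zero] at h1; simp at h1; omega
  | succ k ih =>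
    intro w hw c1 c2 h1 h2 g1 g2 hpp
    by_cases h0 : w = 0
    · subst h0; rw [pvAnc_zero] at h1; simp at h1; omega
    · rw [pvMem_anc P hP w (by omega)] at h1 h2
      have hb : P w < w := hP w (by omega)
      rcases h1 with h1 | h1 <;> rcases h2 with h2 | h2
      · omega
      · exfalso; have := pvMem_anc_le P hP (P w) (P w) (le_refl _) c2 h2
        have := hP c2 g2; subst h1; omega
      · exfalso; have := pvMem_anc_le P hP (P w) (P w) (le_refl _) c1 h1
        have := hP c1 g1; subst h2; omega
      · exact ih (P w) (by omega) c1 c2 h1 h2 g1 g2 hpp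
-- child-list characterisation through a parent function
def pvTC (T : List (List Nat)) (P : Nat → Nat) (N : Nat) : Prop :=
  T.length = N ∧ ∀ u, T.getD u [] = (List.range N).filter (fun v => decide (1 ≤ v) && decide (P v = u))

theorem pvMem_children {T P N} (h : pvTC T P N) (u v : Nat) :
    v ∈ T.getD u [] ↔ (1 ≤ v ∧ v < N ∧ P v = u) := by
  rw [h.2]; simp [List.mem_filter, List.mem_range]; tauto

theorem pvChildren_lt {T P N} (h : pvTC T P N) (hP : ∀ v, 1 ≤ v → P v < v) (u v : Nat)
    (hv : v ∈ T.getD u []) : u < v ∧ v < N := by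
  rw [pvMem_children h] at hv
  have := hP v hv.1
  omega

theorem pvChildren_nodup {T P N} (h : pvTC T P N) (u : Nat) : (T.getD u []).Nodup := by
  rw [h.2]; exact List.Nodup.filter _ (List.nodup_range)

theorem pvChildren_len {T P N} (h : pvTC T P N) (u : Nat) : (T.getD u []).length ≤ N := by
  rw [h.2]
  calc ((List.range N).filter _).length ≤ (List.range N).length := List.length_filter_le _ _
  _ = N := List.length_range

-- subtree size, cost of A's first machine, cost of A's second machine (fuelled, then stabilised)
def pvSzGo (T : List (List Nat)) : Nat → Nat → Nat
  | 0, _ => 1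
  | f+1, u => (T.getD u []).foldl (fun a v => a + pvSzGo T f v) 1

def pvSz (T : List (List Nat)) (N u : Nat) : Nat := pvSzGo T (N - u) u

def pvCGo (T : List (List Nat)) : Nat → Nat → Nat
  | 0, _ => 0
  | f+1, u => (T.getD u []).foldl (fun a v => a + pvCGo T f v) 2

def pvC (T : List (List Nat)) (N u : Nat) : Nat := pvCGo T (N - u) u

def pvC2Go (T : List (List Nat)) : Nat → Nat → Nat
  | 0, _ => 0
  | f+1, u => if (T.getD u []).isEmpty then 1
      else (T.getD u []).foldl (fun a v => a + pvC2Go T f v) 2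

def pvC2 (T : List (List Nat)) (N u : Nat) : Nat := pvC2Go T (N - u) u

theorem pvSzGo_stable {T P N} (h : pvTC T P N) (hP : ∀ v, 1 ≤ v → P v < v) :
    ∀ k f1 f2 u, u < N → N - u ≤ k → N - u ≤ f1 → N - u ≤ f2 →
      pvSzGo T f1 u = pvSzGo T f2 u := by
  intro k
  induction k with
  | zero => intro f1 f2 u hu h0 _ _; omega
  | succ k ih =>
    intro f1 f2 u hu h0 h1 h2
    cases f1 with
    | zero => omega
    | succ g1 =>
      cases f2 with
      | zero => omega
      | succ g2 =>
        simp only [pvSzGo]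
        refine PySem.List.foldl_congr_mem _ _ _ _ (fun a v hv => ?_)
        have hlt := pvChildren_lt h hP u v hv
        rw [ih g1 g2 v hlt.2 (by omega) (by omega) (by omega)]

theorem pvSz_rec {T P N} (h : pvTC T P N) (hP : ∀ v, 1 ≤ v → P v < v) (u : Nat) (hu : u < N) :
    pvSz T N u = (T.getD u []).foldl (fun a v => a + pvSz T N v) 1 := by
  have hk : N - u = (N - u - 1) + 1 := by omega
  rw [pvSz, hk]
  simp only [pvSzGo]
  refine PySem.List.foldl_congr_mem _ _ _ _ (fun a v hv => ?_)
  have hlt := pvChildren_lt h hP u v hv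
  rw [pvSzGo_stable h hP (N - v) (N - u - 1) (N - v) v hlt.2 (le_refl _) (by omega) (le_refl _)]
  rfl

theorem pvCGo_stable {T P N} (h : pvTC T P N) (hP : ∀ v, 1 ≤ v → P v < v) :
    ∀ k f1 f2 u, u < N → N - u ≤ k → N - u ≤ f1 → N - u ≤ f2 →
      pvCGo T f1 u = pvCGo T f2 u := by
  intro k
  induction k with
  | zero => intro f1 f2 u hu h0 _ _; omega
  | succ k ih =>
    intro f1 f2 u hu h0 h1 h2
    cases f1 with
    | zero => omega
    | succ g1 =>
      cases f2 with
      | zero => omega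
      | succ g2 =>
        simp only [pvCGo]
        refine PySem.List.foldl_congr_mem _ _ _ _ (fun a v hv => ?_)
        have hlt := pvChildren_lt h hP u v hv
        rw [ih g1 g2 v hlt.2 (by omega) (by omega) (by omega)]

theorem pvC_rec {T P N} (h : pvTC T P N) (hP : ∀ v, 1 ≤ v → P v < v) (u : Nat) (hu : u < N) :
    pvC T N u = (T.getD u []).foldl (fun a v => a + pvC T N v) 2 := by
  have hk : N - u = (N - u - 1) + 1 := by omega
  rw [pvC, hk]
  simp only [pvCGo]
  refine PySem.List.foldl_congr_mem _ _ _ _ (fun a v hv => ?_)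
  have hlt := pvChildren_lt h hP u v hv
  rw [pvCGo_stable h hP (N - v) (N - u - 1) (N - v) v hlt.2 (le_refl _) (by omega) (le_refl _)]
  rfl

theorem pvC2Go_stable {T P N} (h : pvTC T P N) (hP : ∀ v, 1 ≤ v → P v < v) :
    ∀ k f1 f2 u, u < N → N - u ≤ k → N - u ≤ f1 → N - u ≤ f2 →
      pvC2Go T f1 u = pvC2Go T f2 u := by
  intro k
  induction k with
  | zero => intro f1 f2 u hu h0 _ _; omega
  | succ k ih =>
    intro f1 f2 u hu h0 h1 h2
    cases f1 with
    | zero => omega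
    | succ g1 =>
      cases f2 with
      | zero => omega
      | succ g2 =>
        simp only [pvC2Go, List.getD]
        by_cases he : (T[u]?.getD ([] : List Nat)).isEmpty
        · simp [he]
        · simp only [he, if_false]
          refine PySem.List.foldl_congr_mem _ _ _ _ (fun a v hv => ?_)
          have hlt := pvChildren_lt h hP u v hv
          rw [ih g1 g2 v hlt.2 (by omega) (by omega) (by omega)]

theorem pvC2_rec {T P N} (h : pvTC T P N) (hP : ∀ v, 1 ≤ v → P v < v) (u : Nat) (hu : u < N) :
    pvC2 T N u = if (T.getD u []).isEmpty then 1
      else (T.getD u []).foldl (fun a v => a + pvC2 T N v) 2 := by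
  have hk : N - u = (N - u - 1) + 1 := by omega
  rw [pvC2, hk]
  simp only [pvC2Go, List.getD]
  by_cases he : (T[u]?.getD ([] : List Nat)).isEmpty
  · simp [he]
  · simp only [he, if_false]
    refine PySem.List.foldl_congr_mem _ _ _ _ (fun a v hv => ?_)
    have hlt := pvChildren_lt h hP u v hv
    rw [pvC2Go_stable h hP (N - v) (N - u - 1) (N - v) v hlt.2 (le_refl _) (by omega) (le_refl _)]
    rfl

theorem pvFoldl_add_le (g : Nat → Nat) (l : List Nat) (c M : Nat) (h : ∀ v ∈ l, g v ≤ M) :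
    l.foldl (fun a v => a + g v) c ≤ c + l.length * M := by
  induction l generalizing c with
  | nil => simp
  | cons x xs ih =>
    simp only [List.foldl, List.length_cons]
    have h1 : xs.foldl (fun a v => a + g v) (c + g x) ≤ (c + g x) + xs.length * M :=
      ih (c + g x) (fun v hv => h v (List.mem_cons_of_mem _ hv))
    have h2 : g x ≤ M := h x (by simp)
    calc xs.foldl (fun a v => a + g v) (c + g x) ≤ (c + g x) + xs.length * M := h1
    _ ≤ c + (xs.length + 1) * M := by ring_nf; omega

theorem pvCGo_le {T P N} (h : pvTC T P N) : ∀ f u, pvCGo T f u ≤ 2 * (N+1)^f := by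
  intro f
  induction f with
  | zero => intro u; simp [pvCGo]
  | succ f ih =>
    intro u
    have hx : 1 ≤ (N+1)^f := Nat.one_le_pow _ _ (by omega)
    calc pvCGo T (f+1) u ≤ 2 + (T.getD u []).length * (2 * (N+1)^f) :=
          pvFoldl_add_le _ _ _ _ (fun v _ => ih v)
    _ ≤ 2 + N * (2 * (N+1)^f) := by
          have := pvChildren_len h u
          exact Nat.add_le_add_left (Nat.mul_le_mul_right _ this) 2
    _ ≤ 2 * (N+1)^(f+1) := by
          rw [pow_succ]
          nlinarith

theorem pvFoldl_add_mono (g g' : Nat → Nat) (l : List Nat) (c c' : Nat)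
    (h : ∀ v ∈ l, g v ≤ g' v) (hc : c ≤ c') :
    l.foldl (fun a v => a + g v) c ≤ l.foldl (fun a v => a + g' v) c' := by
  induction l generalizing c c' with
  | nil => simpa
  | cons x xs ih =>
    simp only [List.foldl]
    exact ih (c + g x) (c' + g' x) (fun v hv => h v (List.mem_cons_of_mem _ hv)) (Nat.add_le_add hc (h x (by simp)))

theorem pvC2Go_le_pvCGo (T : List (List Nat)) : ∀ f u, pvC2Go T f u ≤ pvCGo T f u := by
  intro f
  induction f with
  | zero => intro u; simp [pvC2Go, pvCGo]
  | succ f ih =>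
    intro u
    simp only [pvC2Go, pvCGo]
    simp only [List.getD]
    by_cases he : (T[u]?.getD ([] : List Nat)).isEmpty
    · rw [List.isEmpty_iff] at he
      simp [he]
    · simp only [he, if_false]
      exact pvFoldl_add_mono _ _ _ _ _ (fun v _ => ih v) (le_refl _)

theorem pvList_eq_of_getD (A B : List Nat) (N : Nat) (hA : A.length = N) (hB : B.length = N)
    (h : ∀ w, w < N → A.getD w 0 = B.getD w 0) : A = B := by
  apply List.ext_getElem (by omega)
  intro i h1 h2
  have := h i (by omega)
  rwa [List.getD, List.getD, List.getElem?_eq_getElem h1, List.getElem?_eq_getElem h2] at this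

theorem pvEq_rangeMap (V : List Nat) (N : Nat) (h : V.length = N) :
    (List.range N).map (fun w => V.getD w 0) = V :=
  pvList_eq_of_getD _ _ N (by simp) h (fun w hw => by rw [pvGetD_rangeMap]; simp [hw])

theorem parseLoop1_nil (T : List (List Nat)) (f : Nat) (V : List Nat) :
    parseLoop1 T f [] V = V := by cases f <;> rfl

theorem parseLoop1_sim (T : List (List Nat)) (P : Nat → Nat) (N : Nat)
    (h : pvTC T P N) (hP : ∀ v, 1 ≤ v → P v < v) :
    ∀ k u, u < N → N - u ≤ k →
    ∀ f U V, V.length = N → (∀ w, w < N → u ∈ pvAnc P w → V.getD w 0 = 1) →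
      parseLoop1 T (pvC T N u + f) (2*u :: U) V
        = parseLoop1 T f U ((List.range N).map
            (fun w => if u ∈ pvAnc P w then pvSz T N w else V.getD w 0)) := by
  intro k
  induction k with
  | zero => intro u hu h0 _ _ _ _ _; omega
  | succ k ih =>
    intro u hu h0 f U V hVlen hVinit
    have hCu : pvC T N u = 2 + ((T.getD u []).map (pvC T N)).sum := by
      rw [pvC_rec h hP u hu, pvFoldl_add_eq_sum]
    -- step 1: pop the even task 2*u
    have hfuel : pvC T N u + f = ((((T.getD u []).map (pvC T N)).sum) + (1 + f)) + 1 := by omega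
    rw [hfuel]
    simp only [parseLoop1]
    rw [if_neg (by omega : ¬ (2*u) % 2 = 1)]
    have h2u : 2*u/2 = u := by omega
    rw [h2u]
    -- the fold over the (reversed) child list
    have inner : ∀ (r : List Nat), (∀ v ∈ r, v ∈ T.getD u []) → r.Nodup →
        ∀ f' (V' : List Nat) (rest : List Nat), V'.length = N →
        (∀ w, w < N → (∃ v ∈ r, v ∈ pvAnc P w) → V'.getD w 0 = 1) →
        parseLoop1 T ((r.map (pvC T N)).sum + f') ((r.map (fun v => 2*v)) ++ rest) V'
          = parseLoop1 T f' rest ((List.range N).map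
              (fun w => if ∃ v ∈ r, v ∈ pvAnc P w then pvSz T N w else V'.getD w 0)) := by
      intro r
      induction r with
      | nil =>
        intro _ _ f' V' rest hlen _
        simp only [List.map_nil, List.sum_nil, Nat.zero_add, List.nil_append]
        congr 1
        simp only [List.not_mem_nil, false_and, exists_false, if_false]
        exact (pvEq_rangeMap V' N hlen).symm
      | cons v r' ihr =>
        intro hmem hnd f' V' rest hlen hinit
        have hvc : v ∈ T.getD u [] := hmem v (by simp)
        have hlt := pvChildren_lt h hP u v hvc
        have hPv : P v = u ∧ 1 ≤ v := by
          have := (pvMem_children h u v).mp hvc; exact ⟨this.2.2, this.1⟩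
        simp only [List.map_cons, List.sum_cons, List.cons_append]
        have hassoc : pvC T N v + (r'.map (pvC T N)).sum + f'
            = pvC T N v + ((r'.map (pvC T N)).sum + f') := by omega
        rw [hassoc]
        rw [ih v hlt.2 (by omega) _ _ V' hlen
          (fun w hw hv => hinit w hw ⟨v, by simp, hv⟩)]
        rw [ihr (fun v' hv' => hmem v' (by simp [hv'])) (List.Nodup.of_cons hnd) _ _ rest (by simp) ?_]
        · congr 1
          refine List.map_congr_left (fun w hw => ?_)
          rw [List.mem_range] at hw
          by_cases hex : ∃ v' ∈ r', v' ∈ pvAnc P w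
          · rw [if_pos hex, if_pos (show ∃ x ∈ v :: r', x ∈ pvAnc P w by
              obtain ⟨v', h1, h2⟩ := hex; exact ⟨v', List.mem_cons_of_mem _ h1, h2⟩)]
          · rw [if_neg hex, pvGetD_rangeMap, if_pos hw]
            by_cases hva : v ∈ pvAnc P w
            · rw [if_pos hva, if_pos (show ∃ x ∈ v :: r', x ∈ pvAnc P w from ⟨v, by simp, hva⟩)]
            · rw [if_neg hva, if_neg (show ¬ ∃ x ∈ v :: r', x ∈ pvAnc P w by
                rintro ⟨x, hx1, hx2⟩
                rcases List.mem_cons.mp hx1 with rfl | hx1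
                · exact hva hx2
                · exact hex ⟨x, hx1, hx2⟩)]
        · -- remaining entries of later children are still 1
          intro w hw hex
          obtain ⟨v', hv'1, hv'2⟩ := hex
          have hv'c : v' ∈ T.getD u [] := hmem v' (by simp [hv'1])
          have hPv' : P v' = u ∧ 1 ≤ v' := by
            have := (pvMem_children h u v').mp hv'c; exact ⟨this.2.2, this.1⟩
          rw [pvGetD_rangeMap]
          simp only [hw, if_true]
          have hvna : v ∉ pvAnc P w := by
            intro hva
            have := pvAnc_sibling P hP w w (le_refl _) v v' hva hv'2 hPv.2 hPv'.2
              (by rw [hPv.1, hPv'.1])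
            subst this
            exact (List.nodup_cons.mp hnd).1 hv'1
          rw [if_neg hvna]
          exact hinit w hw ⟨v', List.mem_cons_of_mem _ hv'1, hv'2⟩
    -- apply the fold to the reversed child list
    have hrevmem : ∀ v ∈ (T.getD u []).reverse, v ∈ T.getD u [] := fun v hv => List.mem_reverse.mp hv
    have hrevnd : (T.getD u []).reverse.Nodup := List.nodup_reverse.mpr (pvChildren_nodup h u)
    have hrevsum : (((T.getD u []).reverse.map (pvC T N)).sum) = ((T.getD u []).map (pvC T N)).sum := by
      rw [List.map_reverse, List.sum_reverse]
    have hrmap : ((T.getD u []).reverse.map (fun v => 2*v)) = ((T.getD u []).map (fun v => 2*v)).reverse := by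
      rw [List.map_reverse]
    rw [← hrmap, ← hrevsum]
    rw [inner _ hrevmem hrevnd (1 + f) V ((2*u+1) :: U) hVlen ?_]
    · -- the odd task 2*u+1
      have hstep : (1 + f) = f + 1 := by omega
      rw [hstep]
      simp only [parseLoop1]
      rw [if_pos (by omega : (2*u+1) % 2 = 1)]
      have h2u1 : (2*u+1)/2 = u := by omega
      rw [h2u1]
      congr 1
      set V1 := (List.range N).map
          (fun w => if ∃ v ∈ (T.getD u []).reverse, v ∈ pvAnc P w then pvSz T N w else V.getD w 0) with hV1
      have hV1len : V1.length = N := by simp [hV1]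
      have hV1u : V1.getD u 0 = 1 := by
        rw [hV1, pvGetD_rangeMap, if_pos hu]
        rw [if_neg (show ¬ ∃ v ∈ (T.getD u []).reverse, v ∈ pvAnc P u by
          rintro ⟨v, hv1, hv2⟩
          have := pvMem_anc_le P hP u u (le_refl _) v hv2
          have := pvChildren_lt h hP u v (hrevmem v hv1)
          omega)]
        exact hVinit u hu (pvAnc_self P u)
      have hfold : (T.getD u []).foldl (fun a v => a + V1.getD v 0) (V1.getD u 0) = pvSz T N u := by
        rw [hV1u]
        rw [PySem.List.foldl_congr_mem (T.getD u []) _ (fun a v => a + pvSz T N v) 1 ?_]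
        · exact (pvSz_rec h hP u hu).symm
        · intro a v hv
          have hlt := pvChildren_lt h hP u v hv
          rw [hV1, pvGetD_rangeMap, if_pos hlt.2,
            if_pos (show ∃ x ∈ (T.getD u []).reverse, x ∈ pvAnc P v from
              ⟨v, List.mem_reverse.mpr hv, pvAnc_self P v⟩)]
      rw [hfold]
      refine pvList_eq_of_getD _ _ N (by simp [hV1len]) (by simp) (fun w hw => ?_)
      rw [pvGetD_set V1 u w _ 0 (by omega)]
      by_cases hwu : w = u
      · subst hwu
        rw [if_pos rfl, pvGetD_rangeMap, if_pos hw, if_pos (pvAnc_self P w)]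
      · rw [if_neg hwu, hV1, pvGetD_rangeMap, pvGetD_rangeMap, if_pos hw, if_pos hw]
        by_cases hua : u ∈ pvAnc P w
        · obtain ⟨c, hc1, hc2, hc3, hc4⟩ := pvAnc_decomp P hP w w (le_refl _) u hua
            (fun hh => hwu hh.symm)
          have hcT : c ∈ T.getD u [] := (pvMem_children h u c).mpr ⟨hc1, by omega, hc3⟩
          rw [if_pos (show ∃ x ∈ (T.getD u []).reverse, x ∈ pvAnc P w from
            ⟨c, List.mem_reverse.mpr hcT, hc4⟩), if_pos hua]
        · rw [if_neg (show ¬ ∃ x ∈ (T.getD u []).reverse, x ∈ pvAnc P w by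
            rintro ⟨x, hx1, hx2⟩
            have hxT := hrevmem x hx1
            have hPx : P x = u ∧ 1 ≤ x := by
              have := (pvMem_children h u x).mp hxT; exact ⟨this.2.2, this.1⟩
            have hux : u ∈ pvAnc P x := by
              rw [pvAnc_succ P hP x hPx.2, hPx.1]
              exact List.mem_cons_of_mem _ (pvAnc_self P u)
            exact hua (pvAnc_trans P hP w w (le_refl _) u x hux hx2)), if_neg hua]
    · -- initial condition for the fold: everything under u is still 1
      intro w hw hex
      obtain ⟨v, hv1, hv2⟩ := hex
      have hvT := hrevmem v hv1
      have hPv : P v = u ∧ 1 ≤ v := by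
        have := (pvMem_children h u v).mp hvT; exact ⟨this.2.2, this.1⟩
      have hux : u ∈ pvAnc P v := by
        rw [pvAnc_succ P hP v hPv.2, hPv.1]
        exact List.mem_cons_of_mem _ (pvAnc_self P u)
      exact hVinit w hw (pvAnc_trans P hP w w (le_refl _) u v hux hv2)

theorem parseAltFill_res (T : List (List Nat)) (P : Nat → Nat) (N : Nat)
    (h : pvTC T P N) (hP : ∀ v, 1 ≤ v → P v < v) :
    ∀ k u, u < N → N - u ≤ k → ∀ f (sz : List Nat), N - u ≤ f → sz.length = N →
      parseAltFill T f u sz = (pvSz T N u, (List.range N).map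
        (fun w => if u ∈ pvAnc P w then pvSz T N w else sz.getD w 0)) := by
  intro k
  induction k with
  | zero => intro u hu h0 _ _ _ _; omega
  | succ k ih =>
    intro u hu h0 f sz hf hlen
    cases f with
    | zero => omega
    | succ g =>
      simp only [parseAltFill]
      have inner : ∀ (l : List Nat), (∀ v ∈ l, v ∈ T.getD u []) →
          ∀ t0 (sz0 : List Nat), sz0.length = N →
          l.foldl (fun pr v =>
            let r := parseAltFill T g v pr.2
            (pr.1 + r.1, r.2)) (t0, sz0)
            = (t0 + (l.map (pvSz T N)).sum, (List.range N).map
                (fun w => if ∃ v ∈ l, v ∈ pvAnc P w then pvSz T N w else sz0.getD w 0)) := by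
        intro l
        induction l with
        | nil =>
          intro _ t0 sz0 hlen0
          simp only [List.foldl_nil, List.map_nil, List.sum_nil, Nat.add_zero]
          rw [Prod.mk.injEq]
          refine ⟨rfl, ?_⟩
          have hno : ∀ w, ¬ ∃ v ∈ ([] : List Nat), v ∈ pvAnc P w := by rintro w ⟨v, hv, _⟩; simp at hv
          exact ((List.map_congr_left (fun w _ => by rw [if_neg (hno w)])).trans
            (pvEq_rangeMap sz0 N hlen0)).symm
        | cons v l' ihl =>
          intro hmem t0 sz0 hlen0
          have hvc : v ∈ T.getD u [] := hmem v (by simp)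
          have hlt := pvChildren_lt h hP u v hvc
          simp only [List.foldl_cons]
          rw [ih v hlt.2 (by omega) g sz0 (by omega) hlen0]
          rw [ihl (fun v' hv' => hmem v' (List.mem_cons_of_mem _ hv')) _ _ (by simp)]
          rw [Prod.mk.injEq]
          constructor
          · simp only [List.map_cons, List.sum_cons]; omega
          · refine List.map_congr_left (fun w hw => ?_)
            rw [List.mem_range] at hw
            by_cases hex : ∃ v' ∈ l', v' ∈ pvAnc P w
            · rw [if_pos hex, if_pos (show ∃ x ∈ v :: l', x ∈ pvAnc P w by
                obtain ⟨v', h1, h2⟩ := hex; exact ⟨v', List.mem_cons_of_mem _ h1, h2⟩)]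
            · rw [if_neg hex, pvGetD_rangeMap, if_pos hw]
              by_cases hva : v ∈ pvAnc P w
              · rw [if_pos hva, if_pos (show ∃ x ∈ v :: l', x ∈ pvAnc P w from ⟨v, by simp, hva⟩)]
              · rw [if_neg hva, if_neg (show ¬ ∃ x ∈ v :: l', x ∈ pvAnc P w by
                  rintro ⟨x, hx1, hx2⟩
                  rcases List.mem_cons.mp hx1 with rfl | hx1
                  · exact hva hx2
                  · exact hex ⟨x, hx1, hx2⟩)]
      rw [inner (T.getD u []) (fun v hv => hv) 1 sz hlen]
      have hq1 : 1 + ((T.getD u []).map (pvSz T N)).sum = pvSz T N u := by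
        rw [pvSz_rec h hP u hu, pvFoldl_add_eq_sum]
      rw [Prod.mk.injEq]
      refine ⟨by simpa using hq1, ?_⟩
      refine pvList_eq_of_getD _ _ N (by simp) (by simp) (fun w hw => ?_)
      rw [pvGetD_set _ u w _ 0 (by simp [hu])]
      by_cases hwu : w = u
      · subst hwu
        rw [if_pos rfl, pvGetD_rangeMap, if_pos hw, if_pos (pvAnc_self P w), hq1]
      · rw [if_neg hwu, pvGetD_rangeMap, pvGetD_rangeMap, if_pos hw, if_pos hw]
        by_cases hua : u ∈ pvAnc P w
        · obtain ⟨c, hc1, hc2, hc3, hc4⟩ := pvAnc_decomp P hP w w (le_refl _) u hua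
            (fun hh => hwu hh.symm)
          have hcT : c ∈ T.getD u [] := (pvMem_children h u c).mpr ⟨hc1, by omega, hc3⟩
          rw [if_pos (show ∃ x ∈ T.getD u [], x ∈ pvAnc P w from ⟨c, hcT, hc4⟩), if_pos hua]
        · rw [if_neg (show ¬ ∃ x ∈ T.getD u [], x ∈ pvAnc P w by
            rintro ⟨x, hx1, hx2⟩
            have hPx : P x = u ∧ 1 ≤ x := by
              have := (pvMem_children h u x).mp hx1; exact ⟨this.2.2, this.1⟩
            have hux : u ∈ pvAnc P x := by
              rw [pvAnc_succ P hP x hPx.2, hPx.1]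
              exact List.mem_cons_of_mem _ (pvAnc_self P u)
            exact hua (pvAnc_trans P hP w w (le_refl _) u x hux hx2)), if_neg hua]

theorem parseAltDfs_stable (T : List (List Nat)) (P : Nat → Nat) (N : Nat)
    (h : pvTC T P N) (hP : ∀ v, 1 ≤ v → P v < v) (Lc : List Char) (sz : List Nat) :
    ∀ k u, u < N → N - u ≤ k → ∀ f1 f2 (p : Int) st, N - u ≤ f1 → N - u ≤ f2 →
      parseAltDfs T Lc sz f1 u p st = parseAltDfs T Lc sz f2 u p st := by
  intro k
  induction k with
  | zero => intro u hu h0 _ _ _ _ _ _; omega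
  | succ k ih =>
    intro u hu h0 f1 f2 p st h1 h2
    cases f1 with
    | zero => omega
    | succ g1 =>
      cases f2 with
      | zero => omega
      | succ g2 =>
        simp only [parseAltDfs]
        by_cases he : (T.getD u []).isEmpty
        · simp only [List.getD] at he ⊢
          rw [if_pos he, if_pos he]
        · simp only [List.getD] at he ⊢
          rw [if_neg he, if_neg he]
          rw [PySem.List.foldl_congr_mem (T[u]?.getD ([] : List Nat)) _ (fun st' v => parseAltDfs T Lc sz g2 v (↑u) st') _
            (fun a v hv => ih v (pvChildren_lt h hP u v hv).2 (by
              have := pvChildren_lt h hP u v hv; omega) g1 g2 (↑u) a (by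
              have := pvChildren_lt h hP u v hv; omega) (by
              have := pvChildren_lt h hP u v hv; omega))]

theorem parseLoop2_nil (T : List (List Nat)) (Lc : List Char) (V : List Nat) (f : Nat)
    (R : List Nat) (acc : List (Char × Nat)) : parseLoop2 T Lc V f [] R acc = acc := by
  cases f <;> rfl

theorem parseLoop2_sim (T : List (List Nat)) (P : Nat → Nat) (N : Nat)
    (h : pvTC T P N) (hP : ∀ v, 1 ≤ v → P v < v) (Lc : List Char) (V : List Nat) :
    ∀ k u, u < N → N - u ≤ k → ∀ (p : Int) f W R acc,
      parseLoop2 T Lc V (pvC2 T N u + f) ((2*u, p) :: W) R acc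
        = parseLoop2 T Lc V f W
            (parseAltDfs T Lc V (N-u) u p (R, acc)).1
            (parseAltDfs T Lc V (N-u) u p (R, acc)).2 := by
  intro k
  induction k with
  | zero => intro u hu h0 _ _ _ _ _; omega
  | succ k ih =>
    intro u hu h0 p f W R acc
    have hm : N - u = (N - u - 1) + 1 := by omega
    have h2u : 2*u/2 = u := by omega
    by_cases he : (T.getD u []).isEmpty
    · -- leaf node: one pop on the A side, the leaf branch on the B side
      have hc : pvC2 T N u = 1 := by rw [pvC2_rec h hP u hu, if_pos he]
      rw [hc, Nat.add_comm 1 f]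
      simp only [parseLoop2]
      rw [if_neg (by omega : ¬ (2*u) % 2 = 1), h2u, if_pos he, hm]
      simp only [parseAltDfs]
      rw [if_pos he]
    · -- internal node
      have hc : pvC2 T N u = 2 + ((T.getD u []).map (pvC2 T N)).sum := by
        rw [pvC2_rec h hP u hu, if_neg he, pvFoldl_add_eq_sum]
      have hfuel : pvC2 T N u + f = ((((T.getD u []).map (pvC2 T N)).sum) + (1 + f)) + 1 := by omega
      rw [hfuel]
      simp only [parseLoop2]
      rw [if_neg (by omega : ¬ (2*u) % 2 = 1), h2u, if_neg he]
      have hcast : ((2*u : Nat) : Int)/2 = (u : Int) := by push_cast; omega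
      simp only [hcast]
      -- the child pairs pushed on W are processed left to right
      have inner : ∀ (l : List Nat), (∀ v ∈ l, v ∈ T.getD u []) →
          ∀ f' (R' : List Nat) (acc' : List (Char × Nat)) (rest : List (Nat × Int)),
          parseLoop2 T Lc V ((l.map (pvC2 T N)).sum + f')
              ((l.map (fun v => (2*v, (u : Int)))) ++ rest) R' acc'
            = parseLoop2 T Lc V f' rest
                (l.foldl (fun st' v => parseAltDfs T Lc V (N-u-1) v (↑u) st') (R', acc')).1
                (l.foldl (fun st' v => parseAltDfs T Lc V (N-u-1) v (↑u) st') (R', acc')).2 := by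
        intro l
        induction l with
        | nil => intro _ f' R' acc' rest; simp
        | cons v l' ihl =>
          intro hmem f' R' acc' rest
          have hvc : v ∈ T.getD u [] := hmem v (by simp)
          have hlt := pvChildren_lt h hP u v hvc
          simp only [List.map_cons, List.sum_cons, List.cons_append, List.foldl_cons]
          have hassoc : pvC2 T N v + (l'.map (pvC2 T N)).sum + f'
              = pvC2 T N v + ((l'.map (pvC2 T N)).sum + f') := by omega
          rw [hassoc]
          rw [ih v hlt.2 (by omega) (↑u) _ _ R' acc']
          rw [parseAltDfs_stable T P N h hP Lc V (N - v) v hlt.2 (le_refl _) (N-v) (N-u-1) (↑u)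
            (R', acc') (le_refl _) (by omega)]
          exact ihl (fun v' hv' => hmem v' (List.mem_cons_of_mem _ hv')) _ _ _ _
      rw [inner (T.getD u []) (fun v hv => hv) (1 + f) _ _ _]
      -- then the odd task (2*u+1, -1) pops
      have hstep : (1 + f) = f + 1 := by omega
      rw [hstep]
      simp only [parseLoop2]
      rw [if_pos (by omega : (2*u+1) % 2 = 1)]
      have h2u1 : (2*u+1)/2 = u := by omega
      rw [h2u1]
      -- and the B side unfolds to the same state
      rw [hm]
      simp only [parseAltDfs]
      rw [if_neg he]
      simp only [show N - u - 1 + 1 - 1 = N - u - 1 from by omega]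
      by_cases hu0 : u ≠ 0
      · rw [if_pos hu0, if_pos hu0]
      · rw [if_neg hu0, if_neg hu0]

theorem pvGetD_replicate {α : Type} (n : Nat) (x : α) (i : Nat) (d : α) :
    (List.replicate n x).getD i d = if i < n then x else d := by
  by_cases h : i < n
  · simp [List.getD, List.getElem?_replicate, h]
  · simp [List.getD, List.getElem?_replicate, h]

theorem parseScan_eq_alt : ∀ (cs : List Char) (T : List (List Nat)) (S : List Nat) (B : Nat),
    (cs.foldl parseAltStep (T, S, B)).1 = parseScan cs T S B := by
  intro cs
  induction cs with
  | nil => intro T S B; rfl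
  | cons c cs ih =>
    intro T S B
    rw [List.foldl_cons]
    simp only [parseAltStep, parseScan]
    by_cases hup : pvIsUp c
    · rw [if_pos hup, if_pos hup, ih]
    · rw [if_neg hup, if_neg hup, ih]

theorem parseScan_char :
    ∀ (cs : List Char) (T : List (List Nat)) (S : List Nat) (B : Nat) (P : Nat → Nat) (N : Nat),
      T.length = N →
      (∀ u, T.getD u [] = (List.range (B+1)).filter (fun v => decide (1 ≤ v) && decide (P v = u))) →
      (∀ x ∈ S, x ≤ B) →
      (∀ v, 1 ≤ v → v ≤ B → P v < v) →
      B + (cs.filter pvIsUp).length + 1 = N →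
      ∃ P' : Nat → Nat, (∀ v, 1 ≤ v → P' v < v) ∧ pvTC (parseScan cs T S B) P' N := by
  intro cs
  induction cs with
  | nil =>
    intro T S B P N hlen hchar _ hPar hled
    refine ⟨fun v => if v ≤ B then P v else 0, fun v hv => ?_, hlen, fun u => ?_⟩
    · show (if v ≤ B then P v else 0) < v
      by_cases hvB : v ≤ B
      · rw [if_pos hvB]; exact hPar v hv hvB
      · rw [if_neg hvB]; omega
    · simp only [parseScan]
      rw [hchar u]
      have hBN : B + 1 = N := by simpa using hled
      conv_rhs => rw [← hBN]
      refine List.filter_congr (fun v hv => ?_)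
      rw [List.mem_range] at hv
      have hb : (if v ≤ B then P v else 0) = P v := if_pos (by omega : v ≤ B)
      simp only [hb]
  | cons c cs ih =>
    intro T S B P N hlen hchar hS hPar hled
    simp only [parseScan]
    have hS' : ∀ x ∈ (if c = '(' then B :: S else if c = ')' then S.tail else S), x ≤ B := by
      intro x hx
      by_cases h1 : c = '('
      · rw [if_pos h1] at hx
        rcases List.mem_cons.mp hx with rfl | hx
        · exact le_refl _
        · exact hS x hx
      · rw [if_neg h1] at hx
        by_cases h2 : c = ')'
        · rw [if_pos h2] at hx; exact hS x (List.mem_of_mem_tail hx)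
        · rw [if_neg h2] at hx; exact hS x hx
    by_cases hup : pvIsUp c
    · rw [if_pos hup]
      have hled' : (B+1) + (cs.filter pvIsUp).length + 1 = N := by
        rw [List.filter_cons_of_pos hup] at hled
        simp only [List.length_cons] at hled
        omega
      set S' := if c = '(' then B :: S else if c = ')' then S.tail else S with hS'def
      set p := S'.headD 0 with hpdef
      have hpB : p ≤ B := by
        rw [hpdef]
        cases hS'' : S' with
        | nil => simp
        | cons a l => simpa using hS' a (by rw [hS'']; simp)
      have hpN : p < N := by omega
      refine ih (T.set p ((T.getD p []).concat (B+1))) S' (B+1)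
        (fun v => if v = B+1 then p else P v) N (by rw [List.length_set]; exact hlen) ?_ 
        (fun x hx => le_trans (hS' x hx) (by omega)) ?_ hled'
      · intro u
        have hTset : (T.set p ((T.getD p []).concat (B+1))).getD u []
            = if u = p then (T.getD p []).concat (B+1) else T.getD u [] :=
          pvGetD_set T p u _ _ (by omega)
        rw [hTset]
        rw [show B+1+1 = (B+1)+1 from rfl, List.range_succ, List.filter_append]
        have hfeq : (List.range (B+1)).filter
              (fun v => decide (1 ≤ v) && decide ((if v = B+1 then p else P v) = u))
            = (List.range (B+1)).filter (fun v => decide (1 ≤ v) && decide (P v = u)) := by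
          refine List.filter_congr (fun v hv => ?_)
          rw [List.mem_range] at hv
          rw [if_neg (by omega : ¬ v = B+1)]
        rw [hfeq, ← hchar u]
        by_cases hu : u = p
        · subst hu
          simp [List.filter_cons, List.concat_eq_append]
        · rw [if_neg hu]
          simp [List.filter_cons, Ne.symm hu]
      · intro v hv1 hv2
        show (if v = B+1 then p else P v) < v
        by_cases hvB : v = B+1
        · rw [if_pos hvB]; omega
        · rw [if_neg hvB]; exact hPar v hv1 (by omega)
    · rw [if_neg hup]
      have hled' : B + (cs.filter pvIsUp).length + 1 = N := by
        rw [List.filter_cons_of_neg hup] at hled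
        simpa using hled
      exact ih T _ B P N hlen hchar hS' hPar hled'


theorem parse_eq (s : String) (hpre : Pre_parse s) : parse s = parse_alt s := by
  unfold Pre_parse at hpre
  cases hcs : s.toList with
  | nil => rw [hcs] at hpre; simp at hpre
  | cons c cs =>
    rw [hcs] at hpre
    simp only [Bool.and_eq_true] at hpre
    obtain ⟨hup, -⟩ := hpre
    simp only [parse, parse_alt, hcs, List.tail_cons]
    set Lc := (c :: cs).filter pvIsUp with hLc
    set N := Lc.length with hN
    have hN1 : 1 ≤ N := by
      rw [hN, hLc, List.filter_cons_of_pos hup]; simp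
    have hled : 0 + (cs.filter pvIsUp).length + 1 = N := by
      rw [hN, hLc, List.filter_cons_of_pos hup]; simp [Nat.add_comm]
    obtain ⟨P, hP, hTC⟩ := parseScan_char cs (List.replicate N []) [] 0 (fun _ => 0) N
      (by simp)
      (fun u => by
        rw [pvGetD_replicate]
        have : (List.range 1).filter (fun v => decide (1 ≤ v) && decide ((fun _ => 0) v = u)) = [] := by
          simp [List.range_one]
        rw [this]; split <;> rfl)
      (by simp)
      (fun v hv1 hv2 => by omega)
      hled
    set T := parseScan cs (List.replicate N []) [] 0 with hT
    have hTB : (cs.foldl parseAltStep (List.replicate N [], [], 0)).1 = T :=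
      parseScan_eq_alt cs _ _ _
    rw [hTB]
    set fuel := 2*(N+1)^(N+1)+2 with hfuel
    have hC0 : pvC T N 0 ≤ fuel := by
      have h1 : pvC T N 0 ≤ 2 * (N+1)^N := by
        rw [pvC, Nat.sub_zero]; exact pvCGo_le hTC N 0
      have h2 : (N+1)^N ≤ (N+1)^(N+1) := Nat.pow_le_pow_right (by omega) (by omega)
      rw [hfuel]; omega
    set M := (List.range N).map (fun w => if 0 ∈ pvAnc P w then pvSz T N w else 1) with hM
    have hinit : ∀ w, w < N → 0 ∈ pvAnc P w → (List.replicate N 1).getD w 0 = 1 := by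
      intro w hw _; rw [pvGetD_replicate, if_pos hw]
    have hV : parseLoop1 T fuel [0] (List.replicate N 1) = M := by
      have hsim := parseLoop1_sim T P N hTC hP N 0 hN1 (by omega)
        (fuel - pvC T N 0) [] (List.replicate N 1) (by simp) hinit
      simp only [Nat.mul_zero] at hsim
      have hsplit : fuel = pvC T N 0 + (fuel - pvC T N 0) := by omega
      rw [hsplit, hsim, parseLoop1_nil, hM]
      refine List.map_congr_left (fun w hw => ?_)
      rw [List.mem_range] at hw
      rw [pvGetD_replicate, if_pos hw]
    have hfill : (parseAltFill T (N+1) 0 (List.replicate N 1)).2 = M := by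
      rw [parseAltFill_res T P N hTC hP N 0 hN1 (by omega) (N+1) _ (by omega) (by simp), hM]
      refine List.map_congr_left (fun w hw => ?_)
      rw [List.mem_range] at hw
      rw [pvGetD_replicate, if_pos hw]
    rw [hV, hfill]
    have hC2 : pvC2 T N 0 ≤ fuel := by
      have := pvC2Go_le_pvCGo T (N - 0) 0
      rw [← pvC2, ← pvC] at this
      omega
    have hsim2 := parseLoop2_sim T P N hTC hP Lc M N 0 hN1 (by omega)
      (-1) (fuel - pvC2 T N 0) [] (List.replicate N (N-1)) []
    simp only [Nat.mul_zero] at hsim2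
    have hsplit2 : fuel = pvC2 T N 0 + (fuel - pvC2 T N 0) := by omega
    rw [hsplit2, hsim2, parseLoop2_nil]
    have hstab := parseAltDfs_stable T P N hTC hP Lc M N 0 hN1 (by omega)
      (N+1) (N-0) (-1) (List.replicate N (N-1), []) (by omega) (by omega)
    rw [hstab]

-- ===== VERDICT (by name: the statement is the Claim_ definition above) =====
theorem parse_spec : Claim_equal_parse := by
  unfold Claim_equal_parse Spec_parse
  exact fun s _ hpre => parse_eq s hpre
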